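-- pv_equiv track=rewrite | github.com/datacommonsorg/data | scripts/chemistry/periodic_table/process.py | _get_alpha_string
-- ===== SOURCE A (Python) =====
-- def _get_alpha_string(input_string: str) -> str:
--     '''Returns a capitalized string with only alphabets.'''
--     if input_string is None:
--         return None
--     clean_str = [
--         s if s.isalpha() and s.isascii() else ' ' for s in input_string
--     ]
--     joined_str = ''.join(clean_str)
--     return ''.join(
--         [w[0].upper() + w[1:] for w in joined_str.split(' ') if len(w) > 0])
-- ===== SOURCE B (Python) =====
-- def _get_alpha_string(input_string: str) -> str:
--     '''Returns a capitalized string with only alphabets.'''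
--     if input_string is None:
--         return None
--     out = []
--     new_word = True
--     for c in input_string:
--         if c.isalpha() and c.isascii():
--             out.append(c.upper() if new_word else c)
--             new_word = False
--         else:
--             new_word = True
--     return ''.join(out)
-- ===== Notes on version B (the rewrite author's own statement) =====
-- stated objective: simpler
-- what changed: Replaced A's four-stage pipeline (clean each char to a list, join it, space-split it, capitalize each word in a comprehension, join again) with one streaming left-to-right pass keeping a new_word flag, so no intermediate strings or word list are built.
import Mathlib
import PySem

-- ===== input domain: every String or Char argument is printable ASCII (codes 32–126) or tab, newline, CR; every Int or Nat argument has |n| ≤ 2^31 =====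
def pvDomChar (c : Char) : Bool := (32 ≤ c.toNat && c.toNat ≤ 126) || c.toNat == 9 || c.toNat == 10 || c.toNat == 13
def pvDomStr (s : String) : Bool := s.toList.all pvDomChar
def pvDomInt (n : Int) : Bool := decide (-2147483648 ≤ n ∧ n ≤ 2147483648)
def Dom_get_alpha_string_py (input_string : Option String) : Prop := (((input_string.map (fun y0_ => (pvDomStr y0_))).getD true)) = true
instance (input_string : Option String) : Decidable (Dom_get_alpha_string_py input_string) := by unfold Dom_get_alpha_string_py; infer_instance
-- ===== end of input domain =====

-- B replaces A's clean→join→split→capitalize-each-word pipeline by a single streaming pass with a new-word flag (simpler, no intermediates).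

-- ===== PORT A =====
def get_alpha_string_py (input_string : Option String) : Option String :=
  match input_string with
  | none => none
  | some s =>
    -- clean_str = [s if s.isalpha() and s.isascii() else ' ' for s in input_string]
    let cleanStr : List Char :=
      s.toList.map (fun c => if PySem.Chars.isalpha c && decide (c.toNat < 128) then c else ' ')
    -- joined_str = ''.join(clean_str)
    let joinedStr : List Char := cleanStr
    -- ''.join([w[0].upper() + w[1:] for w in joined_str.split(' ') if len(w) > 0])
    some (String.mk (PySem.Chars.join []
      (((PySem.Chars.splitOn joinedStr [' ']).filter (fun w => decide (0 < w.length))).map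
        (fun w => match w with
          | [] => []
          | h :: t => PySem.Chars.upperChar h :: t))))

-- ===== PORT B =====
-- loop of Source B: for c in s, with the new_word flag as the second argument
def pvAltGo : List Char → Bool → List Char
  | [], _ => []
  | c :: rest, newWord =>
    if PySem.Chars.isalpha c && decide (c.toNat < 128) then
      (if newWord then PySem.Chars.upperChar c else c) :: pvAltGo rest false
    else
      pvAltGo rest true

def get_alpha_string_py_alt (input_string : Option String) : Option String :=
  match input_string with
  | none => none
  | some s => some (String.mk (pvAltGo s.toList true))

-- ===== PRECONDITION & SPEC =====
def Spec_get_alpha_string_py (input_string : Option String) (out : Option String) : Prop := out = get_alpha_string_py_alt input_string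
instance (input_string : Option String) (out : Option String) : Decidable (Spec_get_alpha_string_py input_string out) := by unfold Spec_get_alpha_string_py; infer_instance

-- ===== CLAIM (what is proved, stated in full; the proofs are below) =====
def Claim_equal_get_alpha_string_py : Prop := ∀ (input_string : Option String), Dom_get_alpha_string_py input_string → Spec_get_alpha_string_py input_string (get_alpha_string_py input_string)

-- ===== LEMMAS AND PROOFS =====

-- the per-character cleaning and per-word capitalization of port A, named for the proofs
def pvClean (c : Char) : Char :=
  if PySem.Chars.isalpha c && decide (c.toNat < 128) then c else ' '

def pvCap : List Char → List Char
  | [] => []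
  | h :: t => PySem.Chars.upperChar h :: t

-- reference split on a single space, recursing structurally on the string
def pvSplit (pre : List Char) : List Char → List (List Char)
  | [] => [pre]
  | c :: rest => if c = ' ' then pre :: pvSplit [] rest else pvSplit (pre ++ [c]) rest

lemma pvGo_single (fuel : Nat) : ∀ (l cur : List Char) (acc : List (List Char)), l.length ≤ fuel →
    PySem.Chars.splitOn.go [' '] fuel l cur acc = acc.reverse ++ pvSplit cur.reverse l := by
  induction fuel with
  | zero =>
    intro l cur acc h
    have hl : l = [] := List.eq_nil_of_length_eq_zero (Nat.le_zero.mp h)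
    subst hl
    rw [PySem.Chars.splitOn.go.eq_def]
    simp [pvSplit]
  | succ n ih =>
    intro l cur acc h
    cases l with
    | nil =>
      rw [PySem.Chars.splitOn.go.eq_def]
      simp [pvSplit]
    | cons c rest =>
      rw [PySem.Chars.splitOn.go.eq_def]
      simp only []
      by_cases hc : c = ' '
      · subst hc
        rw [if_pos (by simp [List.isPrefixOf])]
        simp only [List.length_cons, List.drop_succ_cons, List.length_nil, List.drop_zero]
        rw [ih rest [] (cur.reverse :: acc) (Nat.le_of_succ_le_succ h)]
        simp [pvSplit]
      · rw [if_neg (by simp [List.isPrefixOf]; intro h'; exact absurd h'.symm hc)]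
        rw [ih rest (c :: cur) acc (Nat.le_of_succ_le_succ h)]
        simp [pvSplit, hc]

lemma pvSplitOn_eq (l : List Char) : PySem.Chars.splitOn l [' '] = pvSplit [] l := by
  have := pvGo_single (l.length + 1) l [] [] (Nat.le_succ _)
  simpa [PySem.Chars.splitOn] using this

lemma pvJoin_nil_flatten (ws : List (List Char)) : PySem.Chars.join [] ws = ws.flatten := by
  induction ws with
  | nil => simp [PySem.Chars.join_nil]
  | cons w ws ih =>
    cases ws with
    | nil => simp [PySem.Chars.join_singleton]
    | cons q rest =>
      rw [PySem.Chars.join_cons_cons]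
      simp [ih]

lemma pvFilter_map_cap (ws : List (List Char)) :
    ((ws.filter (fun w => decide (0 < w.length))).map pvCap).flatten = (ws.map pvCap).flatten := by
  induction ws with
  | nil => rfl
  | cons w ws ih =>
    cases w with
    | nil => simpa [pvCap] using ih
    | cons h t => simp [List.filter, pvCap, ih]

lemma pvMain (cs : List Char) : ∀ pre : List Char,
    ((pvSplit pre (cs.map pvClean)).map pvCap).flatten = pvCap pre ++ pvAltGo cs pre.isEmpty := by
  induction cs with
  | nil => intro pre; simp [pvSplit, pvAltGo, pvCap]
  | cons c cs ih =>
    intro pre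
    by_cases halpha : (PySem.Chars.isalpha c && decide (c.toNat < 128)) = true
    · have hne : c ≠ ' ' := by
        intro hcEq; subst hcEq; exact absurd halpha (by decide)
      have hclean : pvClean c = c := by rw [pvClean, if_pos halpha]
      simp only [List.map_cons, hclean]
      rw [show pvSplit pre (c :: cs.map pvClean) = pvSplit (pre ++ [c]) (cs.map pvClean) from by
        simp only [pvSplit]; rw [if_neg hne]]
      rw [ih (pre ++ [c])]
      rw [show (pre ++ [c]).isEmpty = false from by simp]
      rw [show pvAltGo (c :: cs) pre.isEmpty
            = (if pre.isEmpty then PySem.Chars.upperChar c else c) :: pvAltGo cs false from by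
        simp only [pvAltGo]; rw [if_pos halpha]]
      cases pre with
      | nil => simp [pvCap]
      | cons h t => simp [pvCap]
    · have hclean : pvClean c = ' ' := by rw [pvClean, if_neg halpha]
      simp only [List.map_cons, hclean]
      rw [show pvSplit pre (' ' :: cs.map pvClean) = pre :: pvSplit [] (cs.map pvClean) from by
        simp [pvSplit]]
      simp only [List.map_cons, List.flatten_cons]
      rw [ih []]
      rw [show pvAltGo (c :: cs) pre.isEmpty = pvAltGo cs true from by
        simp only [pvAltGo]; rw [if_neg halpha]]
      simp [pvCap]

-- ===== VERDICT (by name: the statement is the Claim_ definition above) =====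
theorem get_alpha_string_py_spec : Claim_equal_get_alpha_string_py := by
  intro input_string _
  unfold Spec_get_alpha_string_py
  cases input_string with
  | none => rfl
  | some s =>
    have hclean : (fun c : Char => if PySem.Chars.isalpha c && decide (c.toNat < 128) then c else ' ') = pvClean := by
      funext c; rfl
    have hcap : (fun w : List Char => match w with
        | [] => ([] : List Char)
        | h :: t => PySem.Chars.upperChar h :: t) = pvCap := by
      funext w; cases w <;> rfl
    show some (String.mk _) = some (String.mk (pvAltGo s.toList true))
    rw [hclean, hcap, pvSplitOn_eq, pvJoin_nil_flatten, pvFilter_map_cap, pvMain s.toList []]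
    rfl
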